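-- pv_equiv track=rewrite | github.com/RhiannonMichelmore/aoc2018 | 20/1new.py | gen_strings
-- ===== SOURCE A (Python) =====
-- def gen_strings(regex):
--     strings = []
--     position = 0
--     curr_string = ""
--     # if its just a string
--     if sum([1 for x in regex if is_literal(x)]) == len(regex):
--         return [regex]
--     else:
--         found_branch = False
--         tmp_strings = []
--         while not found_branch:
--             if is_literal(regex[position]):
--                 curr_string += regex[position]
--             elif regex[position] == '(':
--                 # get until matching )
--                 stack = ['(']
--                 p = position + 1
--                 while True:
--                     if regex[p] == ')':
--                         if stack[-1] == '(':
--                             stack.pop(-1)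
--                             if len(stack) == 0:
--                                 found_branch = True
--                                 break
--                         else:
--                             stack.append(')')
--                     if regex[p] == '(':
--                         if stack[-1] == ')':
--                             stack.pop(-1)
--                             if len(stack) == 0:
--                                 found_branch = True
--                                 break
--                         else:
--                             stack.append('(')
--                     p += 1
--                 new_reg = regex[position:p+1]
--                 # get branches here
--                 branches = get_branches(new_reg[1:-1])
--                 for b in branches:
--                     tmp_strings = tmp_strings + gen_strings(b)
--                 if not curr_string == "":
--                     for i in range(len(tmp_strings)):
--                         tmp_strings[i] = curr_string + tmp_strings[i]
--             position += 1
--         tail_strings = gen_strings(regex[p+1:])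
--         all_strings = []
--         for tmp in tmp_strings:
--             for tail in tail_strings:
--                 new_string = tmp+tail
--                 all_strings.append(new_string)
--         return all_strings
--
-- def get_branches(regex):
--     position = 0
--     branches = []
--     stack = []
--     curr_string = ""
--     while position < len(regex):
--         if is_literal(regex[position]):
--             curr_string += regex[position]
--         elif regex[position] == ')':
--             curr_string += regex[position]
--             if len(stack) > 0 and stack[-1] == '(':
--                 stack.pop(-1)
--             else:
--                 stack.append(')')
--         elif regex[position] == '(':
--             curr_string += regex[position]
--             if len(stack) > 0 and stack[-1] == ')':
--                 stack.pop(-1)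
--             else:
--                 stack.append('(')
--         elif regex[position] == '|' and len(stack) == 0:
--             branches.append(curr_string)
--             curr_string = ""
--         elif regex[position] == '|' and len(stack) > 0:
--             curr_string += regex[position]
--         position += 1
--     if not curr_string == "":
--         branches.append(curr_string)
--     if regex[-1] == '|':
--         branches.append("")
--     return branches
--
-- def is_literal(c):
--     if c == 'N' or c == 'W' or c == 'S' or c == 'E':
--         return True
--     else:
--         return False
-- ===== SOURCE B (Python) =====
-- def gen_strings(regex):
--     return _expand(_tokenize(regex))
--
--
-- def _match(regex, j):
--     # index of the ')' closing the '(' just before position j (depth counter)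
--     depth = 1
--     while depth > 0:
--         c = regex[j]
--         if c == '(':
--             depth += 1
--         elif c == ')':
--             depth -= 1
--         j += 1
--     return j - 1
--
--
-- def _split_alts(s):
--     # split s at top-level '|' (depth counter); keeps empty alternatives
--     parts = []
--     cur = ""
--     depth = 0
--     for c in s:
--         if c == '|' and depth == 0:
--             parts.append(cur)
--             cur = ""
--         else:
--             if c == '(':
--                 depth += 1
--             elif c == ')':
--                 depth -= 1
--             cur += c
--     parts.append(cur)
--     return parts
--
--
-- def _tokenize(regex):
--     # flat token list: a literal character, or a list of alternative sub-regexes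
--     tokens = []
--     i = 0
--     while i < len(regex):
--         c = regex[i]
--         if c == '(':
--             k = _match(regex, i + 1)
--             tokens.append(_split_alts(regex[i + 1:k]))
--             i = k + 1
--         elif c in 'NWSE':
--             tokens.append(c)
--             i += 1
--         else:
--             raise ValueError('unexpected character: ' + c)
--     return tokens
--
--
-- def _expand(tokens):
--     # ordered Cartesian product, earliest token varies slowest
--     results = [""]
--     for tok in reversed(tokens):
--         if isinstance(tok, str):
--             results = [tok + r for r in results]
--         else:
--             firsts = [s for alt in tok for s in gen_strings(alt)]
--             results = [f + r for f in firsts for r in results]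
--     return results
-- ===== Notes on version B (the rewrite author's own statement) =====
-- stated objective: simpler
-- what changed: A's index/stack while-loop machine (symmetric paren stack, re-scan via recursion on the tail string) is replaced by a validating recursive-descent tokenizer using depth counters (literal and group tokens, alternatives split at top-level '|') plus a right fold building the ordered Cartesian product of token expansions.
-- outside the precondition, e.g. on gen_strings('N|S(E)'): A returns ['NSE'], B raises ValueError; on gen_strings('x(N)'): A returns ['N'], B raises ValueError; on gen_strings('|'): A raises IndexError, B raises ValueError
import Mathlib
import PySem

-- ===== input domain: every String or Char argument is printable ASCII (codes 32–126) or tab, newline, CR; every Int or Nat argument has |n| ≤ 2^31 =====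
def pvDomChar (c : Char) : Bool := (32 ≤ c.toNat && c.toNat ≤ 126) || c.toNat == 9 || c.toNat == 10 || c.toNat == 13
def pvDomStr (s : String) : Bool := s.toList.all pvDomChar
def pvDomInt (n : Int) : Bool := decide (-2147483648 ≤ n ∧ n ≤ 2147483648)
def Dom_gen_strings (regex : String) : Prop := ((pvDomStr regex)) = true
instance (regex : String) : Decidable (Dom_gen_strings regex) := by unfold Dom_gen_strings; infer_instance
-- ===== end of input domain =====

-- B replaces A's index/stack while-loop machine with a recursive-descent tokenizer (depth
-- counters) plus a fold building the ordered Cartesian product; objective: simpler.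
-- Equality is claimed on well-formed path regexes (Pre_); outside Pre_ the Python A raises
-- IndexError or silently drops stray top-level characters, while B's parser rejects the
-- input (ValueError) — see cites.

-- ===== PORT A =====
-- is_literal
def isLiteral (c : Char) : Bool :=
  if c = 'N' then true else if c = 'W' then true else if c = 'S' then true
  else if c = 'E' then true else false

-- A's inner `while True` paren-matching loop; the Python index p is carried as the still
-- unread suffix; the Python stack (top = last) is carried top-first.  Returns the offset of
-- the char on which the loop breaks; none = the loop runs off the end (Python: IndexError).
def matchA : List Char → List Char → Option Nat
  | _, [] => none
  | stack, c :: cs =>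
    if c = ')' then
      match stack with
      | [] => none                                   -- Python: stack[-1] IndexError
      | t :: ts =>
        if t = '(' then
          (if ts.isEmpty then some 0 else (matchA ts cs).map (· + 1))
        else (matchA (')' :: t :: ts) cs).map (· + 1)
    else if c = '(' then
      match stack with
      | [] => none
      | t :: ts =>
        if t = ')' then
          (if ts.isEmpty then some 0 else (matchA ts cs).map (· + 1))
        else (matchA ('(' :: t :: ts) cs).map (· + 1)
    else (matchA stack cs).map (· + 1)

-- A's outer `while not found_branch` loop; returns (curr_string, the group's inside
-- regex[position+1:p], the tail regex[p+1:]); none = loop runs past the end (IndexError).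
def mainLoopA : List Char → List Char → Option (List Char × List Char × List Char)
  | _, [] => none
  | curr, c :: cs =>
    if isLiteral c then mainLoopA (curr ++ [c]) cs
    else if c = '(' then
      match matchA ['('] cs with
      | none => none
      | some k => some (curr, cs.take k, cs.drop (k + 1))
    else mainLoopA curr cs

-- get_branches' scan: state (branches, stack, curr_string)
def gbLoopA : List Char → List (List Char) → List Char → List Char →
    List (List Char) × List Char × List Char
  | [], br, stack, curr => (br, stack, curr)
  | c :: cs, br, stack, curr =>
    if isLiteral c then gbLoopA cs br stack (curr ++ [c])
    else if c = ')' then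
      match stack with
      | '(' :: ts => gbLoopA cs br ts (curr ++ [c])
      | _ => gbLoopA cs br (')' :: stack) (curr ++ [c])
    else if c = '(' then
      match stack with
      | ')' :: ts => gbLoopA cs br ts (curr ++ [c])
      | _ => gbLoopA cs br ('(' :: stack) (curr ++ [c])
    else if c = '|' then
      if stack.isEmpty then gbLoopA cs (br ++ [curr]) stack []
      else gbLoopA cs br stack (curr ++ [c])
    else gbLoopA cs br stack curr                     -- any other char: no branch fires

-- get_branches
def getBranchesA (inner : List Char) : Option (List (List Char)) :=
  match gbLoopA inner [] [] [] with
  | (br, _, curr) =>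
    let br' := if curr ≠ [] then br ++ [curr] else br
    match PySem.List.pyGet? inner (-1) with            -- regex[-1]; none = IndexError
    | none => none
    | some c => some (if c = '|' then br' ++ [[]] else br')

mutual
-- gen_strings on List Char; fuel bounds the recursion depth (the Python recursion has no
-- fuel; fuel = length+1 at top level is enough under Pre_, see genA_eq_genB).
def genA : Nat → List Char → Option (List (List Char))
  | 0, _ => none
  | fuel + 1, s =>
    if s.countP (fun x => isLiteral x) = s.length then some [s]
    else
      match mainLoopA [] s with
      | none => none
      | some (curr, inner, rest) =>
        match getBranchesA inner with
        | none => none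
        | some branches =>
          match tmpLoopA fuel branches [] with
          | none => none
          | some tmp0 =>
            -- `for i in range(len(tmp_strings)): tmp_strings[i] = curr_string + tmp_strings[i]`
            let tmp := if curr ≠ [] then tmp0.map (fun t => curr ++ t) else tmp0
            match genA fuel rest with
            | none => none
            | some tails =>
              -- the nested `for tmp ... for tail ... append`
              some (tmp.foldl (fun acc t => acc ++ tails.map (fun tl => t ++ tl)) [])
  termination_by fuel _ => (fuel, 0)

-- `for b in branches: tmp_strings = tmp_strings + gen_strings(b)`
def tmpLoopA : Nat → List (List Char) → List (List Char) → Option (List (List Char))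
  | _, [], acc => some acc
  | fuel, b :: bs, acc =>
    match genA fuel b with
    | none => none
    | some gs => tmpLoopA fuel bs (acc ++ gs)
  termination_by fuel bs _ => (fuel, bs.length + 1)
end

def gen_strings (regex : String) : List String :=
  match genA (regex.toList.length + 1) regex.toList with
  | some rs => rs.map (fun cs => String.ofList cs)
  | none => []                                        -- Python raises here (outside Pre_)

-- ===== PORT B =====
inductive TokB where
  | lit (c : Char)
  | grp (alts : List (List Char))

-- _match's `while depth > 0` loop (depth counter); returns the number of consumed chars
-- (Python returns j - 1, the index of the closing ')'; consumed = that offset + 1);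
-- none = IndexError.
def matchB (d : Int) (s : List Char) : Option Nat :=
  if 0 < d then
    match s with
    | [] => none
    | c :: cs =>
      (matchB (if c = '(' then d + 1 else if c = ')' then d - 1 else d) cs).map (· + 1)
  else some 0
termination_by s.length
decreasing_by simp

-- _split_alts' for-loop, state (parts, cur, depth)
def splitGoB : List Char → List (List Char) → List Char → Int → List (List Char)
  | [], parts, cur, _ => parts ++ [cur]
  | c :: cs, parts, cur, d =>
    if c = '|' ∧ d = 0 then splitGoB cs (parts ++ [cur]) [] d
    else splitGoB cs parts (cur ++ [c])
        (if c = '(' then d + 1 else if c = ')' then d - 1 else d)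

def splitAltsB (s : List Char) : List (List Char) := splitGoB s [] [] 0

-- _tokenize's while-loop, tokens accumulator; the index i is the dropped prefix
def tokGoB : List Char → List TokB → Option (List TokB)
  | [], toks => some toks
  | c :: cs, toks =>
    if c = '(' then
      match matchB 1 cs with
      | none => none
      | some n =>
        tokGoB (cs.drop n) (toks ++ [TokB.grp (splitAltsB (cs.take (n - 1)))])
    else if c = 'N' ∨ c = 'W' ∨ c = 'S' ∨ c = 'E' then
      tokGoB cs (toks ++ [TokB.lit c])
    else none                                         -- Python: raise ValueError
termination_by s _ => s.length
decreasing_by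
  all_goals simp

def tokenizeB (s : List Char) : Option (List TokB) := tokGoB s []

mutual
def genB : Nat → List Char → Option (List (List Char))
  | 0, _ => none
  | fuel + 1, s =>
    match tokenizeB s with
    | none => none
    | some toks => expandB fuel toks
  termination_by fuel _ => (fuel, 0)

-- _expand's `for tok in reversed(tokens)` accumulation = a fold from the right
def expandB : Nat → List TokB → Option (List (List Char))
  | _, [] => some [[]]
  | fuel, TokB.lit c :: ts =>
    match expandB fuel ts with
    | none => none
    | some rs => some (rs.map (fun r => [c] ++ r))
  | fuel, TokB.grp alts :: ts =>
    match expandB fuel ts with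
    | none => none
    | some rs =>
      match altsLoopB fuel alts with
      | none => none
      | some firsts => some (firsts.flatMap (fun f => rs.map (fun r => f ++ r)))
  termination_by fuel ts => (fuel, sizeOf ts)

-- `[s for alt in tok for s in gen_strings(alt)]`
def altsLoopB : Nat → List (List Char) → Option (List (List Char))
  | _, [] => some []
  | fuel, a :: as_ =>
    match genB fuel a with
    | none => none
    | some g =>
      match altsLoopB fuel as_ with
      | none => none
      | some rest => some (g ++ rest)
  termination_by fuel alts => (fuel, sizeOf alts)
end

def gen_strings_alt (regex : String) : List String :=
  match genB (regex.toList.length + 1) regex.toList with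
  | some rs => rs.map (fun cs => String.ofList cs)
  | none => []

-- ===== PRECONDITION & SPEC =====
def okChar (c : Char) : Bool := isLiteral c || c = '(' || c = ')' || c = '|'

-- paren scan: resulting depth, none if a ')' closes at depth 0 or a '|' occurs at depth 0
def scanP : List Char → Nat → Option Nat
  | [], d => some d
  | c :: cs, d =>
    if c = '(' then scanP cs (d + 1)
    else if c = ')' then (match d with | 0 => none | d' + 1 => scanP cs d')
    else if c = '|' then (match d with | 0 => none | _ + 1 => scanP cs d)
    else scanP cs d

-- no "()" (empty group) anywhere
def noEG : List Char → Bool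
  | [] => true
  | [_] => true
  | c1 :: c2 :: cs => !(c1 = '(' && c2 = ')') && noEG (c2 :: cs)

-- Pre_ = well-formed path regex: only N/W/S/E/(/)/| chars, balanced parentheses, '|' only
-- inside parentheses, no empty group "()".  Outside Pre_ the Python A raises IndexError or
-- silently drops stray top-level characters (an artefact of its scanning loop; see cites).
def Pre_gen_strings (regex : String) : Prop :=
  regex.toList.all okChar = true ∧ scanP regex.toList 0 = some 0 ∧ noEG regex.toList = true
instance (regex : String) : Decidable (Pre_gen_strings regex) := by
  unfold Pre_gen_strings; infer_instance

def pvWitness_gen_strings : String := "N(E|W)S"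

def Spec_gen_strings (regex : String) (out : List String) : Prop := out = gen_strings_alt regex
instance (regex : String) (out : List String) : Decidable (Spec_gen_strings regex out) := by
  unfold Spec_gen_strings; infer_instance

-- ===== CLAIM (what is proved, stated in full; the proofs are below) =====
def Claim_equal_gen_strings : Prop := ∀ (regex : String), Dom_gen_strings regex →
  Pre_gen_strings regex → Spec_gen_strings regex (gen_strings regex)

-- ---- helper scan allowing '|' at any depth (contents of a group) ----
def scanG : List Char → Nat → Option Nat
  | [], d => some d
  | c :: cs, d =>
    if c = '(' then scanG cs (d + 1)
    else if c = ')' then (match d with | 0 => none | d' + 1 => scanG cs d')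
    else scanG cs d

lemma isLiteral_ne {c : Char} (h : isLiteral c = true) : c ≠ '(' ∧ c ≠ ')' ∧ c ≠ '|' := by
  unfold isLiteral at h
  split_ifs at h with h1 h2 h3 h4 <;> subst_vars <;> refine ⟨by decide, by decide, by decide⟩

lemma okChar_cases {c : Char} (h : okChar c = true) :
    isLiteral c = true ∨ c = '(' ∨ c = ')' ∨ c = '|' := by
  unfold okChar at h
  rcases Bool.or_eq_true_iff.mp h with h | h
  · rcases Bool.or_eq_true_iff.mp h with h | h
    · rcases Bool.or_eq_true_iff.mp h with h | h
      · exact Or.inl h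
      · exact Or.inr (Or.inl (by simpa using h))
    · exact Or.inr (Or.inr (Or.inl (by simpa using h)))
  · exact Or.inr (Or.inr (Or.inr (by simpa using h)))

lemma scanG_append (a b : List Char) : ∀ d, scanG (a ++ b) d = (scanG a d).bind (fun m => scanG b m) := by
  induction a with
  | nil => intro d; simp [scanG]
  | cons c cs ih =>
    intro d
    simp only [List.cons_append, scanG]
    split_ifs <;> (try cases d) <;> simp [ih]

lemma scanG_shift (a : List Char) : ∀ {d e} (k : Nat), scanG a d = some e → scanG a (d + k) = some (e + k) := by
  induction a with
  | nil => intro d e k h; simp [scanG] at h ⊢; omega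
  | cons c cs ih =>
    intro d e k h
    simp only [scanG] at h ⊢
    split_ifs at h ⊢ with h1 h2
    · have := ih k (d := d + 1) (e := e) h
      simpa [Nat.add_right_comm] using this
    · cases d with
      | zero => simp at h
      | succ d' =>
        simp only [Nat.succ_add]
        exact ih k h
    · exact ih k h

lemma noEG_cons {c : Char} {cs : List Char} (h : noEG (c :: cs) = true) : noEG cs = true := by
  cases cs with
  | nil => simp [noEG]
  | cons c2 cs' => simp [noEG] at h; exact h.2

lemma noEG_append_right {a b : List Char} (h : noEG (a ++ b) = true) : noEG b = true := by
  induction a with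
  | nil => simpa using h
  | cons c cs ih => exact ih (noEG_cons (by simpa using h))

lemma noEG_append_left {a b : List Char} (h : noEG (a ++ b) = true) : noEG a = true := by
  induction a with
  | nil => simp [noEG]
  | cons c cs ih =>
    cases cs with
    | nil => simp [noEG]
    | cons c2 cs' =>
      simp only [List.cons_append, noEG, Bool.and_eq_true] at h ⊢
      exact ⟨h.1, ih (by simpa using h.2)⟩
lemma matchA_correct : ∀ (inner : List Char) {d : Nat} (rest : List Char),
    scanG inner d = some 0 →
    matchA (List.replicate (d + 1) '(') (inner ++ ')' :: rest) = some inner.length := by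
  intro inner
  induction inner with
  | nil =>
    intro d rest h
    simp [scanG] at h
    subst h
    simp [matchA]
  | cons c cs ih =>
    intro d rest h
    simp only [scanG] at h
    simp only [List.cons_append, matchA]
    by_cases hC : c = ')'
    · subst hC
      rw [if_neg (by decide)] at h
      rw [if_pos rfl] at h
      cases d with
      | zero => simp at h
      | succ d' =>
        rw [if_pos rfl]
        have h' : scanG cs d' = some 0 := h
        have h2 := ih rest h'
        rw [List.replicate_succ] at h2
        simp [List.replicate_succ, h2]
    · by_cases hP : c = '('
      · subst hP
        rw [if_pos rfl] at h
        rw [if_neg (by decide), if_pos rfl]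
        have : matchA ('(' :: '(' :: List.replicate d '(') (cs ++ ')' :: rest) = some cs.length := by
          have := ih rest (d := d + 1) h
          simpa [List.replicate_succ] using this
        simp [List.replicate_succ, this]
      · rw [if_neg hP, if_neg hC] at h
        rw [if_neg hC, if_neg hP]
        simp [ih rest h]
lemma matchB_correct : ∀ (inner : List Char) {d : Nat} (rest : List Char),
    scanG inner d = some 0 →
    matchB ((d : Int) + 1) (inner ++ ')' :: rest) = some (inner.length + 1) := by
  intro inner
  induction inner with
  | nil =>
    intro d rest h
    simp [scanG] at h
    subst h
    rw [matchB.eq_def]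
    simp only [List.nil_append, Nat.cast_zero, zero_add, if_pos (by norm_num : (0:Int) < 1)]
    rw [matchB.eq_def]
    simp
  | cons c cs ih =>
    intro d rest h
    simp only [scanG] at h
    rw [matchB.eq_def]
    rw [if_pos (by positivity : (0:Int) < (d:Int) + 1)]
    simp only [List.cons_append]
    by_cases hP : c = '('
    · subst hP
      rw [if_pos rfl] at h
      have h2 := ih rest (d := d + 1) h
      rw [if_pos rfl]
      push_cast at h2 ⊢
      rw [h2]
      simp
    · by_cases hC : c = ')'
      · subst hC
        rw [if_neg (by decide), if_pos rfl] at h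
        cases d with
        | zero => simp at h
        | succ d' =>
          have h' : scanG cs d' = some 0 := h
          have h2 := ih rest h'
          rw [if_neg (by decide), if_pos rfl]
          have heq : ((d' + 1 : Nat) : Int) + 1 - 1 = ((d' : Nat) : Int) + 1 := by push_cast; ring
          rw [heq, h2]
          simp
      · rw [if_neg hP, if_neg hC] at h
        have h2 := ih rest (d := d) h
        rw [if_neg hP, if_neg hC, h2]
        simp

lemma mainLoopA_lits : ∀ (lits : List Char) (curr rem : List Char),
    (∀ c ∈ lits, isLiteral c = true) →
    mainLoopA curr (lits ++ rem) = mainLoopA (curr ++ lits) rem := by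
  intro lits
  induction lits with
  | nil => intro curr rem _; simp
  | cons c cs ih =>
    intro curr rem h
    have hc : isLiteral c = true := h c (by simp)
    simp only [List.cons_append, mainLoopA]
    rw [if_pos hc]
    rw [ih (curr ++ [c]) rem (fun x hx => h x (by simp [hx]))]
    simp

lemma mainLoopA_open {inner : List Char} (curr rest : List Char)
    (h : scanG inner 0 = some 0) :
    mainLoopA curr ('(' :: inner ++ ')' :: rest) = some (curr, inner, rest) := by
  simp only [List.cons_append, mainLoopA]
  rw [if_neg (by decide)]
  simp only [if_true, eq_self_iff_true]
  have hm := matchA_correct inner rest (d := 0) h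
  simp only [List.replicate_succ, List.replicate_zero] at hm
  rw [hm]
  have ht : List.take inner.length (inner ++ ')' :: rest) = inner := by simp
  have hd : List.drop (inner.length + 1) (inner ++ ')' :: rest) = rest := by
    have he : inner ++ ')' :: rest = (inner ++ [')']) ++ rest := by simp
    have hl : inner.length + 1 = (inner ++ [')']).length := by simp
    rw [he, hl, List.drop_left]
  simp [ht, hd]
-- properties of the parts produced by splitGoB (B's _split_alts), for the recursion
lemma splitGo_spec : ∀ (inner : List Char) (d : Nat) (parts : List (List Char)) (cur : List Char),
    scanG inner d = some 0 →
    inner.all okChar = true →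
    cur.all okChar = true →
    noEG (cur ++ inner) = true →
    (∀ t, scanP t d = some 0 → scanP (cur ++ t) 0 = some 0) →
    ∃ tl, splitGoB inner parts cur (d : Int) = parts ++ tl ∧ tl ≠ [] ∧
      ∀ p ∈ tl, scanP p 0 = some 0 ∧ p.all okChar = true ∧ noEG p = true ∧
        p.length ≤ cur.length + inner.length := by
  intro inner
  induction inner with
  | nil =>
    intro d parts cur hscan hok hcok hneg hcur
    simp only [scanG] at hscan
    have hd : d = 0 := by simpa using hscan
    subst hd
    refine ⟨[cur], by simp [splitGoB], by simp, ?_⟩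
    intro p hp
    rw [List.mem_singleton] at hp
    rw [hp]
    have h0 : scanP cur 0 = some 0 := by
      have := hcur [] (by simp [scanP])
      simpa using this
    exact ⟨h0, hcok, by simpa using hneg, by simp⟩
  | cons c cs ih =>
    intro d parts cur hscan hok hcok hneg hcur
    have hok' := hok
    simp only [List.all_cons, Bool.and_eq_true] at hok'
    have hokc : okChar c = true := hok'.1
    have hokcs : cs.all okChar = true := hok'.2
    by_cases hsplit : c = '|' ∧ d = 0
    · obtain ⟨hc, hd⟩ := hsplit
      subst hc; subst hd
      have hscan' : scanG cs 0 = some 0 := by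
        simpa [scanG] using hscan
      rw [splitGoB]
      rw [if_pos (by exact ⟨rfl, rfl⟩)]
      have hneg' : noEG ([] ++ cs) = true := by
        have : noEG ((cur ++ ['|']) ++ cs) = true := by simpa using hneg
        simpa using noEG_append_right this
      obtain ⟨tl, heq, hne, hprops⟩ := ih 0 (parts ++ [cur]) [] hscan' hokcs (by simp)
        hneg' (by intro t ht; simpa using ht)
      refine ⟨cur :: tl, by simpa using heq, by simp, ?_⟩
      intro p hp
      rcases List.mem_cons.mp hp with hp | hp
      · rw [hp]
        have h0 : scanP cur 0 = some 0 := by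
          have := hcur [] (by simp [scanP])
          simpa using this
        exact ⟨h0, hcok, noEG_append_left hneg, by simp⟩
      · obtain ⟨h1, h2, h3, h4⟩ := hprops p hp
        exact ⟨h1, h2, h3, by simp at h4 ⊢; omega⟩
    · -- append step
      have hnsplit : ¬(c = '|' ∧ (d : Int) = 0) := by
        intro ⟨h1, h2⟩
        exact hsplit ⟨h1, by exact_mod_cast h2⟩
      rw [splitGoB, if_neg hnsplit]
      have hcok' : (cur ++ [c]).all okChar = true := by
        simp [List.all_append, hcok, hokc]
      have hneg' : noEG ((cur ++ [c]) ++ cs) = true := by simpa using hneg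
      -- the updated depth, with the scan fact and the prefix-extension fact
      rcases okChar_cases hokc with hlit | hc | hc | hc
      · -- literal
        obtain ⟨hn1, hn2, hn3⟩ := isLiteral_ne hlit
        have hd' : (if c = '(' then (d:Int) + 1 else if c = ')' then (d:Int) - 1 else (d:Int)) = (d:Int) := by
          rw [if_neg hn1, if_neg hn2]
        rw [hd']
        have hscan' : scanG cs d = some 0 := by
          simpa [scanG, hn1, hn2] using hscan
        have hcur' : ∀ t, scanP t d = some 0 → scanP ((cur ++ [c]) ++ t) 0 = some 0 := by
          intro t ht
          have : scanP (c :: t) d = some 0 := by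
            simp only [scanP]
            rw [if_neg hn1, if_neg hn2, if_neg hn3]
            exact ht
          simpa using hcur (c :: t) this
        obtain ⟨tl, heq, hne, hprops⟩ := ih d parts (cur ++ [c]) hscan' hokcs hcok' hneg' hcur'
        refine ⟨tl, heq, hne, ?_⟩
        intro p hp
        obtain ⟨h1, h2, h3, h4⟩ := hprops p hp
        exact ⟨h1, h2, h3, by simp at h4 ⊢; omega⟩
      · -- '('
        subst hc
        have hd' : (if '(' = '(' then (d:Int) + 1 else if '(' = ')' then (d:Int) - 1 else (d:Int)) = ((d + 1 : Nat) : Int) := by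
          rw [if_pos rfl]; push_cast; ring
        rw [hd']
        have hscan' : scanG cs (d + 1) = some 0 := by
          simpa [scanG] using hscan
        have hcur' : ∀ t, scanP t (d + 1) = some 0 → scanP ((cur ++ ['(']) ++ t) 0 = some 0 := by
          intro t ht
          have : scanP ('(' :: t) d = some 0 := by simpa [scanP] using ht
          simpa using hcur ('(' :: t) this
        obtain ⟨tl, heq, hne, hprops⟩ := ih (d + 1) parts (cur ++ ['(']) hscan' hokcs hcok' hneg' hcur'
        refine ⟨tl, heq, hne, ?_⟩
        intro p hp
        obtain ⟨h1, h2, h3, h4⟩ := hprops p hp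
        exact ⟨h1, h2, h3, by simp at h4 ⊢; omega⟩
      · -- ')'
        subst hc
        cases d with
        | zero => simp [scanG] at hscan
        | succ d'' =>
          have hd' : (if ')' = '(' then ((d''+1 : Nat):Int) + 1 else if ')' = ')' then ((d''+1 : Nat):Int) - 1 else ((d''+1 : Nat):Int)) = ((d'' : Nat) : Int) := by
            rw [if_neg (by decide), if_pos rfl]; push_cast; ring
          rw [hd']
          have hscan' : scanG cs d'' = some 0 := by
            simpa [scanG] using hscan
          have hcur' : ∀ t, scanP t d'' = some 0 → scanP ((cur ++ [')']) ++ t) 0 = some 0 := by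
            intro t ht
            have : scanP (')' :: t) (d'' + 1) = some 0 := by simpa [scanP] using ht
            simpa using hcur (')' :: t) this
          obtain ⟨tl, heq, hne, hprops⟩ := ih d'' parts (cur ++ [')']) hscan' hokcs hcok' hneg' hcur'
          refine ⟨tl, heq, hne, ?_⟩
          intro p hp
          obtain ⟨h1, h2, h3, h4⟩ := hprops p hp
          exact ⟨h1, h2, h3, by simp at h4 ⊢; omega⟩
      · -- '|' at depth > 0
        subst hc
        cases d with
        | zero => exact absurd ⟨rfl, rfl⟩ hsplit
        | succ d'' =>
          have hd' : (if '|' = '(' then ((d''+1 : Nat):Int) + 1 else if '|' = ')' then ((d''+1 : Nat):Int) - 1 else ((d''+1 : Nat):Int)) = ((d''+1 : Nat) : Int) := by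
            rw [if_neg (by decide), if_neg (by decide)]
          rw [hd']
          have hscan' : scanG cs (d'' + 1) = some 0 := by
            simpa [scanG] using hscan
          have hcur' : ∀ t, scanP t (d'' + 1) = some 0 → scanP ((cur ++ ['|']) ++ t) 0 = some 0 := by
            intro t ht
            have : scanP ('|' :: t) (d'' + 1) = some 0 := by simpa [scanP] using ht
            simpa using hcur ('|' :: t) this
          obtain ⟨tl, heq, hne, hprops⟩ := ih (d'' + 1) parts (cur ++ ['|']) hscan' hokcs hcok' hneg' hcur'
          refine ⟨tl, heq, hne, ?_⟩
          intro p hp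
          obtain ⟨h1, h2, h3, h4⟩ := hprops p hp
          exact ⟨h1, h2, h3, by simp at h4 ⊢; omega⟩
lemma getLast?_cons_ne {c : Char} {cs : List Char} (h : cs ≠ []) :
    (c :: cs).getLast? = cs.getLast? := by
  cases cs with
  | nil => exact absurd rfl h
  | cons x xs => simp [List.getLast?_cons_cons]

lemma gbLoopA_cons_lit {c : Char} {cs curr : List Char} {br : List (List Char)}
    (stack : List Char) (h : isLiteral c = true) :
    gbLoopA (c :: cs) br stack curr = gbLoopA cs br stack (curr ++ [c]) := by
  rcases stack with _ | ⟨t, ts⟩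
  · rw [gbLoopA.eq_4 _ _ _ _ _ (by simp) (by simp), if_pos h]
  · by_cases ht : t = '('
    · subst ht; rw [gbLoopA.eq_2, if_pos h]
    · by_cases ht2 : t = ')'
      · subst ht2; rw [gbLoopA.eq_3, if_pos h]
      · rw [gbLoopA.eq_4 _ _ _ _ _ (by rintro ts' ⟨⟩; exact ht rfl) (by rintro ts' ⟨⟩; exact ht2 rfl),
           if_pos h]

lemma gbLoopA_cons_open {cs curr : List Char} {br : List (List Char)} (d : Nat) :
    gbLoopA ('(' :: cs) br (List.replicate d '(') curr =
      gbLoopA cs br (List.replicate (d + 1) '(') (curr ++ ['(']) := by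
  cases d with
  | zero =>
    rw [gbLoopA.eq_4 _ _ _ _ _ (by simp) (by simp)]
    simp [isLiteral, List.replicate_succ]
  | succ d' =>
    rw [List.replicate_succ, gbLoopA.eq_2]
    simp [isLiteral, List.replicate_succ]

lemma gbLoopA_cons_close {cs curr : List Char} {br : List (List Char)} (d : Nat) :
    gbLoopA (')' :: cs) br (List.replicate (d + 1) '(') curr =
      gbLoopA cs br (List.replicate d '(') (curr ++ [')']) := by
  rw [List.replicate_succ, gbLoopA.eq_2]
  simp [isLiteral]

lemma gbLoopA_cons_pipe0 {cs curr : List Char} {br : List (List Char)} :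
    gbLoopA ('|' :: cs) br [] curr = gbLoopA cs (br ++ [curr]) [] [] := by
  rw [gbLoopA.eq_4 _ _ _ _ _ (by simp) (by simp)]
  simp [isLiteral]

lemma gbLoopA_cons_pipeS {cs curr : List Char} {br : List (List Char)} (d : Nat) :
    gbLoopA ('|' :: cs) br (List.replicate (d + 1) '(') curr =
      gbLoopA cs br (List.replicate (d + 1) '(') (curr ++ ['|']) := by
  rw [List.replicate_succ, gbLoopA.eq_2]
  simp [isLiteral, List.replicate_succ]

-- A's get_branches scan agrees with B's _split_alts scan
lemma gbLoop_spec : ∀ (inner : List Char) (d : Nat) (br parts : List (List Char)) (cur : List Char),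
    scanG inner d = some 0 → inner.all okChar = true →
    ∃ init last st,
      splitGoB inner parts cur (d : Int) = (parts ++ init) ++ [last] ∧
      gbLoopA inner br (List.replicate d '(') cur = (br ++ init, st, last) ∧
      (inner = [] → init = [] ∧ last = cur) ∧
      (inner.getLast? = some '|' → last = []) ∧
      (last = [] → (inner = [] ∧ cur = []) ∨ inner.getLast? = some '|') := by
  intro inner
  induction inner with
  | nil =>
    intro d br parts cur hscan hok
    have hd : d = 0 := by simpa [scanG] using hscan
    subst hd
    refine ⟨[], cur, [], by simp [splitGoB], by simp [gbLoopA], fun _ => ⟨rfl, rfl⟩, by simp, ?_⟩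
    intro h
    exact Or.inl ⟨rfl, h⟩
  | cons c cs ih =>
    intro d br parts cur hscan hok
    have hok' := hok
    simp only [List.all_cons, Bool.and_eq_true] at hok'
    have hokc : okChar c = true := hok'.1
    have hokcs : cs.all okChar = true := hok'.2
    rcases okChar_cases hokc with hlit | hc | hc | hc
    · -- literal char: both append to cur
      obtain ⟨hn1, hn2, hn3⟩ := isLiteral_ne hlit
      have hscan' : scanG cs d = some 0 := by simpa [scanG, hn1, hn2] using hscan
      have hcsne : cs ≠ [] ∨ True := Or.inr trivial
      obtain ⟨init, last, st, e1, e2, c0, c1, c2⟩ := ih d br parts (cur ++ [c]) hscan' hokcs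
      refine ⟨init, last, st, ?_, ?_, by simp, ?_, ?_⟩
      · rw [splitGoB, if_neg (by rintro ⟨h, -⟩; exact hn3 h)]
        rw [if_neg hn1, if_neg hn2]
        exact e1
      · rw [gbLoopA_cons_lit _ hlit]
        exact e2
      · intro hl
        by_cases hcs : cs = []
        · subst hcs
          simp at hl
          exact absurd hl hn3
        · exact c1 (by rwa [getLast?_cons_ne hcs] at hl)
      · intro hl
        rcases c2 hl with ⟨h1, h2⟩ | h1
        · exact absurd h2 (by simp)
        · have : cs ≠ [] := by intro h; rw [h] at h1; simp at h1
          exact Or.inr (by rwa [getLast?_cons_ne this])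
    · -- '('
      subst hc
      have hscan' : scanG cs (d + 1) = some 0 := by simpa [scanG] using hscan
      obtain ⟨init, last, st, e1, e2, c0, c1, c2⟩ := ih (d + 1) br parts (cur ++ ['(']) hscan' hokcs
      have hcsne : cs ≠ [] := by
        intro h; subst h; simp [scanG] at hscan'
      refine ⟨init, last, st, ?_, ?_, by simp, ?_, ?_⟩
      · rw [splitGoB, if_neg (by rintro ⟨h, -⟩; exact absurd h (by decide))]
        rw [if_pos rfl]
        have : (d : Int) + 1 = ((d + 1 : Nat) : Int) := by push_cast; ring
        rw [this]
        exact e1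
      · rw [gbLoopA_cons_open d]
        exact e2
      · intro hl
        exact c1 (by rwa [getLast?_cons_ne hcsne] at hl)
      · intro hl
        rcases c2 hl with ⟨h1, h2⟩ | h1
        · exact absurd h2 (by simp)
        · have : cs ≠ [] := hcsne
          exact Or.inr (by rwa [getLast?_cons_ne this])
    · -- ')'
      subst hc
      cases d with
      | zero => simp [scanG] at hscan
      | succ d'' =>
        have hscan' : scanG cs d'' = some 0 := by simpa [scanG] using hscan
        obtain ⟨init, last, st, e1, e2, c0, c1, c2⟩ := ih d'' br parts (cur ++ [')']) hscan' hokcs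
        refine ⟨init, last, st, ?_, ?_, by simp, ?_, ?_⟩
        · rw [splitGoB, if_neg (by rintro ⟨h, -⟩; exact absurd h (by decide))]
          rw [if_neg (by decide), if_pos rfl]
          have : ((d'' + 1 : Nat) : Int) - 1 = ((d'' : Nat) : Int) := by push_cast; ring
          rw [this]
          exact e1
        · rw [gbLoopA_cons_close d'']
          exact e2
        · intro hl
          by_cases hcs : cs = []
          · subst hcs
            simp at hl
          · exact c1 (by rwa [getLast?_cons_ne hcs] at hl)
        · intro hl
          rcases c2 hl with ⟨h1, h2⟩ | h1
          · exact absurd h2 (by simp)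
          · have : cs ≠ [] := by intro h; rw [h] at h1; simp at h1
            exact Or.inr (by rwa [getLast?_cons_ne this])
    · -- '|'
      subst hc
      have hscan' : scanG cs d = some 0 := by simpa [scanG] using hscan
      cases d with
      | zero =>
        -- split point: stack is empty
        obtain ⟨init, last, st, e1, e2, c0, c1, c2⟩ := ih 0 (br ++ [cur]) (parts ++ [cur]) [] hscan' hokcs
        refine ⟨cur :: init, last, st, ?_, ?_, by simp, ?_, ?_⟩
        · rw [splitGoB, if_pos ⟨rfl, by norm_num⟩]
          rw [show ((0 : Nat) : Int) = 0 by norm_num] at e1 ⊢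
          rw [e1]
          simp
        · rw [List.replicate_zero, gbLoopA_cons_pipe0]
          rw [List.replicate_zero] at e2
          rw [e2]
          simp
        · intro hl
          by_cases hcs : cs = []
          · subst hcs
            obtain ⟨-, h2⟩ := c0 rfl
            exact h2
          · exact c1 (by rwa [getLast?_cons_ne hcs] at hl)
        · intro hl
          by_cases hcs : cs = []
          · exact Or.inr (by subst hcs; simp)
          · rcases c2 hl with ⟨h1, -⟩ | h1
            · exact absurd h1 hcs
            · exact Or.inr (by rwa [getLast?_cons_ne hcs])
      | succ d'' =>
        -- '|' at positive depth: both append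
        have hcsne : cs ≠ [] := by
          intro h; subst h; simp [scanG] at hscan'
        obtain ⟨init, last, st, e1, e2, c0, c1, c2⟩ := ih (d'' + 1) br parts (cur ++ ['|']) hscan' hokcs
        refine ⟨init, last, st, ?_, ?_, by simp, ?_, ?_⟩
        · rw [splitGoB, if_neg (by rintro ⟨-, h⟩; revert h; push_cast; omega)]
          rw [if_neg (by decide), if_neg (by decide)]
          exact e1
        · rw [gbLoopA_cons_pipeS d'']
          exact e2
        · intro hl
          exact c1 (by rwa [getLast?_cons_ne hcsne] at hl)
        · intro hl
          rcases c2 hl with ⟨h1, h2⟩ | h1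
          · exact absurd h2 (by simp)
          · exact Or.inr (by rwa [getLast?_cons_ne hcsne])
lemma getBranchesA_eq {inner : List Char} (hne : inner ≠ [])
    (hscan : scanG inner 0 = some 0) (hok : inner.all okChar = true) :
    getBranchesA inner = some (splitAltsB inner) := by
  obtain ⟨init, last, st, e1, e2, c0, c1, c2⟩ := gbLoop_spec inner 0 [] [] [] hscan hok
  rw [List.replicate_zero] at e2
  have hsplit : splitAltsB inner = init ++ [last] := by
    have h := e1
    rw [show ((0 : Nat) : Int) = 0 by norm_num] at h
    simpa [splitAltsB] using h
  have hgl : inner.getLast? = some (inner.getLast hne) := List.getLast?_eq_some_getLast hne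
  unfold getBranchesA
  rw [e2]
  simp only []
  rw [PySem.List.pyGet?_neg_one, hgl]
  by_cases hl : last = []
  · have hpipe : inner.getLast? = some '|' := by
      rcases c2 hl with ⟨h1, -⟩ | h1
      · exact absurd h1 hne
      · exact h1
    have hc : inner.getLast hne = '|' := by
      rw [hgl] at hpipe; injection hpipe
    rw [if_neg (by simpa using hl)]
    simp [hc, hsplit, hl]
  · have hc : inner.getLast hne ≠ '|' := by
      intro h
      exact hl (c1 (by rw [hgl, h]))
    rw [if_pos (by simpa using hl)]
    simp [hc, hsplit]

lemma decomp7a : ∀ (n : Nat) (cs : List Char) (d : Nat), cs.length ≤ n →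
    scanP cs (d + 1) = some 0 →
    ∃ inner rest, cs = inner ++ ')' :: rest ∧ scanG inner 0 = some 0 ∧ scanP rest d = some 0 := by
  intro n
  induction n with
  | zero =>
    intro cs d hlen hscan
    have : cs = [] := List.length_eq_zero_iff.mp (Nat.le_zero.mp hlen)
    subst this
    simp [scanP] at hscan
  | succ n ih =>
    intro cs d hlen hscan
    cases cs with
    | nil => simp [scanP] at hscan
    | cons c cs' =>
      by_cases hP : c = '('
      · subst hP
        have h1 : scanP cs' (d + 2) = some 0 := by simpa [scanP] using hscan
        obtain ⟨i, r, he, hi, hr⟩ := ih cs' (d + 1) (by simpa using hlen) h1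
        have hrlen : r.length ≤ n := by
          have := congrArg List.length he
          simp at this
          simp at hlen
          omega
        obtain ⟨i2, r2, he2, hi2, hr2⟩ := ih r d hrlen hr
        refine ⟨'(' :: i ++ ')' :: i2, r2, ?_, ?_, hr2⟩
        · rw [he, he2]; simp
        · have hsh : scanG i 1 = some 1 := by
            have := scanG_shift i (d := 0) (e := 0) 1 hi
            simpa using this
          simp only [List.cons_append, scanG, if_pos rfl]
          rw [show (0 + 1 : Nat) = 1 by norm_num]
          rw [scanG_append]
          rw [hsh]
          simpa [scanG] using hi2
      · by_cases hC : c = ')'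
        · subst hC
          have h1 : scanP cs' d = some 0 := by simpa [scanP] using hscan
          exact ⟨[], cs', by simp, by simp [scanG], h1⟩
        · have h1 : scanP cs' (d + 1) = some 0 := by
            simp only [scanP] at hscan
            rw [if_neg hP, if_neg hC] at hscan
            by_cases hB : c = '|'
            · rwa [if_pos hB] at hscan
            · rwa [if_neg hB] at hscan
          obtain ⟨i, r, he, hi, hr⟩ := ih cs' d (by simpa using hlen) h1
          refine ⟨c :: i, r, by rw [he]; simp, ?_, hr⟩
          simp only [scanG]
          rw [if_neg hP, if_neg hC]
          exact hi

lemma decomp : ∀ (s : List Char), s.all okChar = true → scanP s 0 = some 0 →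
    (∃ c ∈ s, isLiteral c = false) →
    ∃ lits inner rest, s = lits ++ '(' :: inner ++ ')' :: rest ∧
      (∀ c ∈ lits, isLiteral c = true) ∧ scanG inner 0 = some 0 ∧ scanP rest 0 = some 0 := by
  intro s
  induction s with
  | nil => rintro - - ⟨c, hc, -⟩; cases hc
  | cons c cs ih =>
    intro hok hscan hex
    have hok' := hok
    simp only [List.all_cons, Bool.and_eq_true] at hok'
    rcases okChar_cases hok'.1 with hlit | hc | hc | hc
    · obtain ⟨hn1, hn2, hn3⟩ := isLiteral_ne hlit
      have hscan' : scanP cs 0 = some 0 := by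
        simp only [scanP] at hscan
        rwa [if_neg hn1, if_neg hn2, if_neg hn3] at hscan
      have hex' : ∃ x ∈ cs, isLiteral x = false := by
        obtain ⟨x, hx, hxl⟩ := hex
        rcases List.mem_cons.mp hx with rfl | hx
        · rw [hlit] at hxl; cases hxl
        · exact ⟨x, hx, hxl⟩
      obtain ⟨lits, inner, rest, he, hl, hi, hr⟩ := ih hok'.2 hscan' hex'
      exact ⟨c :: lits, inner, rest, by rw [he]; simp, by
        intro x hx
        rcases List.mem_cons.mp hx with rfl | hx
        · exact hlit
        · exact hl x hx, hi, hr⟩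
    · subst hc
      have h1 : scanP cs 1 = some 0 := by simpa [scanP] using hscan
      obtain ⟨inner, rest, he, hi, hr⟩ := decomp7a cs.length cs 0 le_rfl h1
      exact ⟨[], inner, rest, by rw [he]; simp, by simp, hi, hr⟩
    · subst hc
      simp [scanP] at hscan
    · subst hc
      simp [scanP] at hscan
lemma tokGo_acc : ∀ (n : Nat) (s : List Char), s.length ≤ n → ∀ (toks : List TokB),
    tokGoB s toks = (tokGoB s []).map (toks ++ ·) := by
  intro n
  induction n with
  | zero =>
    intro s hlen toks
    have : s = [] := List.length_eq_zero_iff.mp (Nat.le_zero.mp hlen)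
    subst this
    simp [tokGoB]
  | succ n ih =>
    intro s hlen toks
    cases s with
    | nil => simp [tokGoB]
    | cons c cs =>
      rw [tokGoB, tokGoB]
      by_cases hP : c = '('
      · rw [if_pos hP, if_pos hP]
        cases hm : matchB 1 cs with
        | none => simp
        | some nn =>
          have hd : (cs.drop nn).length ≤ n := by
            have h1 : cs.length ≤ n := by simpa using hlen
            have := List.length_drop (l := cs) (i := nn)
            omega
          have h1 := ih (cs.drop nn) hd (toks ++ [TokB.grp (splitAltsB (cs.take (nn - 1)))])
          have h2 := ih (cs.drop nn) hd ([] ++ [TokB.grp (splitAltsB (cs.take (nn - 1)))])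
          simp only [List.nil_append] at h2
          cases htg : tokGoB (cs.drop nn) [] with
          | none => simp [h1, h2, htg]
          | some ts => simp [h1, h2, htg]
      · rw [if_neg hP, if_neg hP]
        by_cases hL : c = 'N' ∨ c = 'W' ∨ c = 'S' ∨ c = 'E'
        · rw [if_pos hL, if_pos hL]
          have hd : cs.length ≤ n := by simpa using hlen
          have h1 := ih cs hd (toks ++ [TokB.lit c])
          have h2 := ih cs hd ([] ++ [TokB.lit c])
          simp only [List.nil_append] at h2
          cases htg : tokGoB cs [] with
          | none => simp [h1, h2, htg]
          | some ts => simp [h1, h2, htg]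
        · rw [if_neg hL, if_neg hL]
          simp

lemma tok_lits : ∀ (lits : List Char), (∀ c ∈ lits, isLiteral c = true) →
    ∀ (rem : List Char) (toks : List TokB),
    tokGoB (lits ++ rem) toks = tokGoB rem (toks ++ lits.map TokB.lit) := by
  intro lits
  induction lits with
  | nil => intro _ rem toks; simp
  | cons c cs ih =>
    intro h rem toks
    have hc := h c (by simp)
    obtain ⟨hn1, -, -⟩ := isLiteral_ne hc
    have hL : c = 'N' ∨ c = 'W' ∨ c = 'S' ∨ c = 'E' := by
      unfold isLiteral at hc
      split_ifs at hc with h1 h2 h3 h4 <;> subst_vars <;> simp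
    simp only [List.cons_append]
    rw [tokGoB, if_neg hn1, if_pos hL]
    rw [ih (fun x hx => h x (by simp [hx])) rem (toks ++ [TokB.lit c])]
    simp

lemma tok_open {inner : List Char} (rest : List Char) (toks : List TokB)
    (h : scanG inner 0 = some 0) :
    tokGoB ('(' :: (inner ++ ')' :: rest)) toks =
      tokGoB rest (toks ++ [TokB.grp (splitAltsB inner)]) := by
  rw [tokGoB, if_pos rfl]
  have hm := matchB_correct inner rest (d := 0) h
  rw [show ((0 : Nat) : Int) + 1 = 1 by norm_num] at hm
  rw [hm]
  have ht : List.take (inner.length + 1 - 1) (inner ++ ')' :: rest) = inner := by simp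
  have hd : List.drop (inner.length + 1) (inner ++ ')' :: rest) = rest := by
    have he : inner ++ ')' :: rest = (inner ++ [')']) ++ rest := by simp
    have hl : inner.length + 1 = (inner ++ [')']).length := by simp
    rw [he, hl, List.drop_left]
  simp [ht, hd]

lemma expand_lits : ∀ (lits : List Char) (f : Nat) (ts : List TokB),
    expandB f (lits.map TokB.lit ++ ts) =
      (expandB f ts).map (fun rs => rs.map (fun r => lits ++ r)) := by
  intro lits
  induction lits with
  | nil =>
    intro f ts
    simp only [List.map_nil, List.nil_append]
    cases he : expandB f ts with
    | none => simp [he]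
    | some rs => simp [he]
  | cons c cs ih =>
    intro f ts
    simp only [List.map_cons, List.cons_append]
    rw [expandB, ih f ts]
    cases expandB f ts with
    | none => simp
    | some rs => simp [Function.comp_def]

lemma genB_zero (s : List Char) : genB 0 s = none := by rw [genB]

lemma mono_alts {f : Nat} (hg : ∀ s r, genB f s = some r → genB (f + 1) s = some r) :
    ∀ (alts : List (List Char)) r, altsLoopB f alts = some r → altsLoopB (f + 1) alts = some r := by
  intro alts
  induction alts with
  | nil => intro r h; rw [altsLoopB] at h ⊢; exact h
  | cons a as ih =>
    intro r h
    rw [altsLoopB] at h ⊢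
    cases hga : genB f a with
    | none => rw [hga] at h; cases h
    | some g =>
      rw [hga] at h
      rw [hg a g hga]
      cases hla : altsLoopB f as with
      | none => rw [hla] at h; cases h
      | some rest =>
        rw [hla] at h
        rw [ih rest hla]
        exact h

lemma mono_exp {f : Nat} (hg : ∀ s r, genB f s = some r → genB (f + 1) s = some r) :
    ∀ (ts : List TokB) r, expandB f ts = some r → expandB (f + 1) ts = some r := by
  intro ts
  induction ts with
  | nil => intro r h; rw [expandB] at h ⊢; exact h
  | cons tok ts ih =>
    intro r h
    cases tok with
    | lit c =>
      rw [expandB] at h ⊢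
      cases he : expandB f ts with
      | none => rw [he] at h; cases h
      | some rs => rw [he] at h; rw [ih rs he]; exact h
    | grp alts =>
      rw [expandB] at h ⊢
      cases he : expandB f ts with
      | none => rw [he] at h; cases h
      | some rs =>
        rw [he] at h
        rw [ih rs he]
        cases ha : altsLoopB f alts with
        | none => rw [ha] at h; cases h
        | some firsts =>
          rw [ha] at h
          rw [mono_alts hg alts firsts ha]
          exact h

lemma monoB : ∀ (f : Nat) (s : List Char) r, genB f s = some r → genB (f + 1) s = some r := by
  intro f
  induction f with
  | zero => intro s r h; rw [genB_zero] at h; cases h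
  | succ f ih =>
    intro s r h
    rw [genB] at h ⊢
    cases ht : tokenizeB s with
    | none => rw [ht] at h; cases h
    | some toks =>
      rw [ht] at h
      exact mono_exp ih toks r h

lemma tmpLoopA_altsLoopB : ∀ (f : Nat) (bs : List (List Char)),
    (∀ b ∈ bs, genA f b = genB f b) → ∀ (acc : List (List Char)),
    tmpLoopA f bs acc = (altsLoopB f bs).map (acc ++ ·) := by
  intro f bs
  induction bs with
  | nil => intro _ acc; rw [tmpLoopA, altsLoopB]; simp
  | cons b bs ih =>
    intro h acc
    rw [tmpLoopA, altsLoopB]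
    rw [h b (by simp)]
    cases hg : genB f b with
    | none => simp
    | some g =>
      have hi := ih (fun x hx => h x (by simp [hx])) (acc ++ g)
      cases hla : altsLoopB f bs with
      | none => simp [hi, hla]
      | some rest => simp [hi, hla]

lemma altsLoopB_some : ∀ (f : Nat) (bs : List (List Char)),
    (∀ b ∈ bs, ∃ g, genB f b = some g) → ∃ F, altsLoopB f bs = some F := by
  intro f bs
  induction bs with
  | nil => intro _; exact ⟨[], by rw [altsLoopB]⟩
  | cons b bs ih =>
    intro h
    obtain ⟨g, hg⟩ := h b (by simp)
    obtain ⟨F, hF⟩ := ih (fun x hx => h x (by simp [hx]))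
    refine ⟨g ++ F, ?_⟩
    rw [altsLoopB, hg, hF]
lemma genAB_eq : ∀ (f : Nat) (s : List Char), s.length < f →
    s.all okChar = true → scanP s 0 = some 0 → noEG s = true →
    ∃ r, genA f s = some r ∧ genB f s = some r := by
  intro f
  induction f with
  | zero => intro s h; exact absurd h (Nat.not_lt_zero _)
  | succ f ih =>
    intro s hlen hok hscan hneg
    by_cases hall : s.countP (fun x => isLiteral x) = s.length
    · -- all-literal: both return [s]
      have hall' : ∀ c ∈ s, isLiteral c = true := List.countP_eq_length.mp hall
      refine ⟨[s], ?_, ?_⟩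
      · rw [genA, if_pos hall]
      · rw [genB]
        have ht : tokenizeB s = some (s.map TokB.lit) := by
          unfold tokenizeB
          have h1 := tok_lits s hall' [] []
          simpa [tokGoB] using h1
        rw [ht]
        have he := expand_lits s f []
        simp only [List.append_nil] at he
        simp [he, expandB]
    · -- there is a group
      have hex : ∃ c ∈ s, isLiteral c = false := by
        by_contra hno
        push_neg at hno
        refine hall (List.countP_eq_length.mpr ?_)
        intro a ha
        have := hno a ha
        simpa using this
      obtain ⟨lits, inner, rest, heq, hlits, hinner, hrest⟩ := decomp s hok hscan hex
      subst heq
      have hok' := hok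
      simp only [List.all_append, List.all_cons, Bool.and_eq_true] at hok'
      have hokI : inner.all okChar = true := by tauto
      have hokR : rest.all okChar = true := by tauto
      have hassoc : lits ++ '(' :: inner ++ ')' :: rest =
          lits ++ ('(' :: (inner ++ ')' :: rest)) := by simp
      have hnegTail : noEG ('(' :: (inner ++ ')' :: rest)) = true :=
        noEG_append_right (hassoc ▸ hneg)
      have hnegMid : noEG (inner ++ ')' :: rest) = true := noEG_cons hnegTail
      have hnegI : noEG inner = true := noEG_append_left hnegMid
      have hnegR : noEG rest = true := noEG_cons (noEG_append_right hnegMid)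
      have hinne : inner ≠ [] := by
        intro h
        subst h
        simp [noEG] at hnegTail
      -- lengths
      have hL : lits.length + inner.length + rest.length + 2 < f + 1 := by
        simp only [List.length_append, List.length_cons] at hlen
        omega
      -- the alternatives of the group
      obtain ⟨tl, hsplit_eq, htlne, hprops⟩ :=
        splitGo_spec inner 0 [] [] hinner hokI (by simp) (by simpa using hnegI)
          (by intro t ht; simpa using ht)
      have hsplitAlts : splitAltsB inner = tl := by
        have h := hsplit_eq
        rw [show ((0 : Nat) : Int) = 0 by norm_num] at h
        simpa [splitAltsB] using h
      have hbr : getBranchesA inner = some tl := by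
        rw [getBranchesA_eq hinne hinner hokI, hsplitAlts]
      -- recursive results for every alternative
      have hIHparts : ∀ b ∈ tl, ∃ rb, genA f b = some rb ∧ genB f b = some rb := by
        intro b hb
        obtain ⟨hbP, hbOk, hbEG, hbLen⟩ := hprops b hb
        simp only [List.length_nil, Nat.zero_add] at hbLen
        exact ih b (by omega) hbOk hbP hbEG
      have hABparts : ∀ b ∈ tl, genA f b = genB f b := by
        intro b hb
        obtain ⟨rb, h1, h2⟩ := hIHparts b hb
        rw [h1, h2]
      obtain ⟨F, hF⟩ := altsLoopB_some f tl (fun b hb => by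
        obtain ⟨rb, -, h2⟩ := hIHparts b hb; exact ⟨rb, h2⟩)
      -- recursive result for the tail
      obtain ⟨rt, hArt, hBrt⟩ := ih rest (by omega) hokR hrest hnegR
      -- the A-side loop results
      have hMain : mainLoopA [] (lits ++ '(' :: inner ++ ')' :: rest) = some (lits, inner, rest) := by
        have h1 := mainLoopA_lits lits [] ('(' :: (inner ++ ')' :: rest)) hlits
        simp only [List.nil_append] at h1
        have h2 := mainLoopA_open lits rest (inner := inner) hinner
        rw [← h2]
        simpa using h1
      have hTmp : tmpLoopA f tl [] = some F := by
        rw [tmpLoopA_altsLoopB f tl hABparts [], hF]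
        simp
      -- B-side tokenization
      have hmono := monoB f rest rt hBrt
      rw [genB] at hmono
      obtain ⟨trest, hTrest, hErest⟩ :
          ∃ trest, tokenizeB rest = some trest ∧ expandB f trest = some rt := by
        cases h' : tokenizeB rest with
        | none => rw [h'] at hmono; cases hmono
        | some tr => rw [h'] at hmono; exact ⟨tr, rfl, hmono⟩
      have hTok : tokenizeB (lits ++ '(' :: inner ++ ')' :: rest) =
          some (lits.map TokB.lit ++ TokB.grp tl :: trest) := by
        unfold tokenizeB
        have h1 := tok_lits lits hlits ('(' :: (inner ++ ')' :: rest)) []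
        simp only [List.nil_append] at h1
        have h2 := tok_open (inner := inner) rest (lits.map TokB.lit) hinner
        have h3 := tokGo_acc rest.length rest le_rfl (lits.map TokB.lit ++ [TokB.grp (splitAltsB inner)])
        rw [show tokGoB rest [] = some trest from hTrest] at h3
        rw [hsplitAlts] at h2 h3
        calc tokGoB (lits ++ '(' :: inner ++ ')' :: rest) []
            = tokGoB ('(' :: (inner ++ ')' :: rest)) (lits.map TokB.lit) := by
              rw [← h1]; simp
          _ = tokGoB rest (lits.map TokB.lit ++ [TokB.grp tl]) := h2
          _ = some (lits.map TokB.lit ++ TokB.grp tl :: trest) := by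
              rw [h3]; simp
      -- B-side expansion
      have hExp : expandB f (lits.map TokB.lit ++ TokB.grp tl :: trest) =
          some ((F.flatMap (fun x => rt.map (fun r => x ++ r))).map (fun r => lits ++ r)) := by
        rw [expand_lits]
        rw [expandB, hErest, hF]
        rfl
      -- assemble both sides
      refine ⟨(F.flatMap (fun x => rt.map (fun r => x ++ r))).map (fun r => lits ++ r), ?_, ?_⟩
      · rw [genA, if_neg hall, hMain]
        simp only [hbr, hTmp, hArt]
        have hfold := PySem.List.foldl_append_eq_flatMap
          (l := if lits ≠ [] then F.map (fun t => lits ++ t) else F)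
          (g := fun t => rt.map (fun tl => t ++ tl)) (acc := [])
        simp only [List.nil_append] at hfold
        rw [hfold]
        have htmp2 : (if lits ≠ [] then F.map (fun t => lits ++ t) else F) =
            F.map (fun t => lits ++ t) := by
          by_cases hl : lits = []
          · subst hl; simp
          · rw [if_pos hl]
        rw [htmp2]
        simp [List.flatMap_map, List.map_flatMap, List.map_map, Function.comp_def, List.append_assoc]
      · rw [genB, hTok]
        exact hExp

-- ===== VERDICT (by name: the statement is the Claim_ definition above) =====
theorem gen_strings_spec : Claim_equal_gen_strings := by
  unfold Claim_equal_gen_strings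
  intro regex hdom hpre
  unfold Spec_gen_strings
  obtain ⟨hok, hscan, hneg⟩ := hpre
  obtain ⟨r, hA, hB⟩ :=
    genAB_eq (regex.toList.length + 1) regex.toList (by omega) hok hscan hneg
  unfold gen_strings gen_strings_alt
  rw [hA, hB]
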